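-- pv_equiv track=rewrite | github.com/hberens/encryption_algorithms | aes_kak.py | _affine_forward
-- ===== SOURCE A (Python) =====
-- def _gf_mul(a: int, b: int) -> int:
--   # classic shift-and-add multiply in gf(2^8)
--   p = 0
--   for _ in range(8):
--     if b & 1:
--       p ^= a
--     hi = a & 0x80
--     a = (a << 1) & 0xFF
--     if hi:
--       a ^= 0x1B
--     b >>= 1
--   return p
--
-- def _gf_inv(a: int) -> int:
--   if a == 0:
--     return 0
--   # inverse in GF(2^8) mod x^8+x^4+x^3+x+1 via a^(254)
--   p, r = 1, a
--   e = 254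
--   while e:
--     if e & 1:
--       p = _gf_mul(p, r)
--     r = _gf_mul(r, r)
--     e >>= 1
--   return p
--
-- def _affine_forward(x: int) -> int:
--   """SubBytes: MI in GF(2^8) then affine (Kak §8.5.2, matrix with c = 0x63)."""
--   if x == 0:
--     y = 0
--   else:
--     y = _gf_inv(x)
--   z = 0
--   for i in range(8):
--     bi = (y >> i) & 1
--     t = bi
--     t ^= (y >> ((i + 4) % 8)) & 1
--     t ^= (y >> ((i + 5) % 8)) & 1
--     t ^= (y >> ((i + 6) % 8)) & 1
--     t ^= (y >> ((i + 7) % 8)) & 1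
--     t ^= (0x63 >> i) & 1
--     z |= t << i
--   return z
-- ===== SOURCE B (Python) =====
-- def _gf_mul(a: int, b: int) -> int:
--   # classic shift-and-add multiply in gf(2^8)
--   p = 0
--   for _ in range(8):
--     if b & 1:
--       p ^= a
--     hi = a & 0x80
--     a = (a << 1) & 0xFF
--     if hi:
--       a ^= 0x1B
--     b >>= 1
--   return p
--
-- def _gf_inv(a: int) -> int:
--   if a == 0:
--     return 0
--   # inverse in GF(2^8) mod x^8+x^4+x^3+x+1 via a^(254)
--   p, r = 1, a
--   e = 254
--   while e:
--     if e & 1: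
--       p = _gf_mul(p, r)
--     r = _gf_mul(r, r)
--     e >>= 1
--   return p
--
-- def _rotr8(v: int, r: int) -> int:
--   # true 8-bit right rotate (v already masked to 8 bits)
--   return ((v >> r) | (v << (8 - r))) & 0xFF
--
-- def _affine_forward(x: int) -> int:
--   """SubBytes: MI in GF(2^8) then affine, bit-parallel on the whole byte."""
--   y = 0 if x == 0 else _gf_inv(x)
--   yb = y & 0xFF
--   return yb ^ _rotr8(yb, 4) ^ _rotr8(yb, 5) ^ _rotr8(yb, 6) ^ _rotr8(yb, 7) ^ 0x63
-- ===== Notes on version B (the rewrite author's own statement) =====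
-- stated objective: simpler
-- what changed: The bit-serial affine loop (8 iterations, one output bit each, indices (i+k)%8) is replaced by the bit-parallel closed form yb ^ rotr8(yb,4) ^ rotr8(yb,5) ^ rotr8(yb,6) ^ rotr8(yb,7) ^ 0x63 computed on the whole byte at once; the GF(2^8) inverse is kept.
import Mathlib
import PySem

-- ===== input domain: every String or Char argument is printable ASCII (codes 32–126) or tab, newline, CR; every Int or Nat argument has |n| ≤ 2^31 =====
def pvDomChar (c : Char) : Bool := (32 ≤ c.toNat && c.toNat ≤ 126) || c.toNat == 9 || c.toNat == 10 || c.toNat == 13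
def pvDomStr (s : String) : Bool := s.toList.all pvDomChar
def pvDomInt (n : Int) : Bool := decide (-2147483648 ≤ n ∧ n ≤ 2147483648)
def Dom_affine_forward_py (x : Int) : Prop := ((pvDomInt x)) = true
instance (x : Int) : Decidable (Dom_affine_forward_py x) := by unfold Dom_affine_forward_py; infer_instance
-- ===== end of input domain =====

-- B replaces A's bit-serial affine loop by the bit-parallel closed form y ^ rotr8(y,4..7) ^ 0x63 (objective: simpler).


-- ===== PORT A =====
-- _gf_mul: shift-and-add multiply, 8 iterations over state (p, a, b)
def gfMulA (a b : Int) : Int :=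
  ((List.range 8).foldl (fun (s : Int × Int × Int) _ =>
      let p := s.1; let a := s.2.1; let b := s.2.2
      let p := if PySem.Int.band b 1 ≠ 0 then PySem.Int.bxor p a else p
      let hi := PySem.Int.band a 0x80
      let a := PySem.Int.band (a <<< (1 : Nat)) 0xFF
      let a := if hi ≠ 0 then PySem.Int.bxor a 0x1B else a
      (p, a, b >>> (1 : Nat))) (0, a, b)).1

-- the 'while e:' loop of _gf_inv (e starts at the literal 254, halves each turn)
def gfInvLoopA (p r : Int) (e : Nat) : Int :=
  if e = 0 then p
  else gfInvLoopA (if e &&& 1 ≠ 0 then gfMulA p r else p) (gfMulA r r) (e >>> 1)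
termination_by e
decreasing_by simp [Nat.shiftRight_eq_div_pow]; omega

def gfInvA (a : Int) : Int := if a = 0 then 0 else gfInvLoopA 1 a 254

-- the per-bit affine loop of _affine_forward
def affineLoopA (y : Int) : Int :=
  (List.range 8).foldl (fun (z : Int) (i : Nat) =>
    let bi := PySem.Int.band (y >>> i) 1
    let t := bi
    let t := PySem.Int.bxor t (PySem.Int.band (y >>> ((i + 4) % 8)) 1)
    let t := PySem.Int.bxor t (PySem.Int.band (y >>> ((i + 5) % 8)) 1)
    let t := PySem.Int.bxor t (PySem.Int.band (y >>> ((i + 6) % 8)) 1)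
    let t := PySem.Int.bxor t (PySem.Int.band (y >>> ((i + 7) % 8)) 1)
    let t := PySem.Int.bxor t (PySem.Int.band ((0x63 : Int) >>> i) 1)
    PySem.Int.bor z (t <<< i)) 0

def affine_forward_py (x : Int) : Int :=
  affineLoopA (if x = 0 then 0 else gfInvA x)

-- ===== PORT B =====
-- Source B keeps the same _gf_mul/_gf_inv helpers (verbatim copies)
def gfMulB (a b : Int) : Int :=
  ((List.range 8).foldl (fun (s : Int × Int × Int) _ =>
      let p := s.1; let a := s.2.1; let b := s.2.2
      let p := if PySem.Int.band b 1 ≠ 0 then PySem.Int.bxor p a else p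
      let hi := PySem.Int.band a 0x80
      let a := PySem.Int.band (a <<< (1 : Nat)) 0xFF
      let a := if hi ≠ 0 then PySem.Int.bxor a 0x1B else a
      (p, a, b >>> (1 : Nat))) (0, a, b)).1

def gfInvLoopB (p r : Int) (e : Nat) : Int :=
  if e = 0 then p
  else gfInvLoopB (if e &&& 1 ≠ 0 then gfMulB p r else p) (gfMulB r r) (e >>> 1)
termination_by e
decreasing_by simp [Nat.shiftRight_eq_div_pow]; omega

def gfInvB (a : Int) : Int := if a = 0 then 0 else gfInvLoopB 1 a 254

-- _rotr8: true 8-bit right rotate of an already-masked byte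
def rotr8 (v : Int) (r : Nat) : Int :=
  PySem.Int.band (PySem.Int.bor (v >>> r) (v <<< (8 - r))) 0xFF

-- bit-parallel affine step: yb ^ rotr8(yb,4) ^ rotr8(yb,5) ^ rotr8(yb,6) ^ rotr8(yb,7) ^ 0x63
def affineFormB (y : Int) : Int :=
  let yb := PySem.Int.band y 0xFF
  PySem.Int.bxor (PySem.Int.bxor (PySem.Int.bxor (PySem.Int.bxor (PySem.Int.bxor yb
    (rotr8 yb 4)) (rotr8 yb 5)) (rotr8 yb 6)) (rotr8 yb 7)) 0x63

def affine_forward_py_alt (x : Int) : Int :=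
  affineFormB (if x = 0 then 0 else gfInvB x)

-- ===== PRECONDITION & SPEC =====
def Spec_affine_forward_py (x : Int) (out : Int) : Prop := out = affine_forward_py_alt x
instance (x : Int) (out : Int) : Decidable (Spec_affine_forward_py x out) := by unfold Spec_affine_forward_py; infer_instance

-- ===== CLAIM (what is proved, stated in full; the proofs are below) =====
def Claim_equal_affine_forward_py : Prop := ∀ (x : Int), Dom_affine_forward_py x → Spec_affine_forward_py x (affine_forward_py x)

-- ===== LEMMAS AND PROOFS =====

theorem gfMul_eq : gfMulB = gfMulA := rfl

theorem gfInvLoop_eq (e : Nat) : ∀ p r : Int, gfInvLoopB p r e = gfInvLoopA p r e := by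
  induction e using Nat.strong_induction_on with
  | _ e ih =>
    intro p r
    rw [gfInvLoopB, gfInvLoopA, gfMul_eq]
    by_cases h : e = 0
    · simp [h]
    · simp only [if_neg h]
      exact ih (e >>> 1) (by simp [Nat.shiftRight_eq_div_pow]; omega) _ _

theorem gfInv_eq (a : Int) : gfInvB a = gfInvA a := by
  unfold gfInvB gfInvA
  by_cases h : a = 0 <;> simp [h, gfInvLoop_eq]

-- Python's y & 0xFF is the nonnegative residue y mod 256 (both cases of PySem.Int.band)
theorem band255_eq_emod (y : Int) : PySem.Int.band y 255 = y % 256 := by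
  cases y with
  | ofNat n =>
    have h1 : PySem.Int.band (Int.ofNat n) 255 = ((n &&& 255 : Nat) : Int) := by
      exact_mod_cast PySem.Int.band_natCast n 255
    have h2 : n &&& 255 = n % 256 := by
      have := Nat.and_two_pow_sub_one_eq_mod n 8
      norm_num at this; omega
    rw [Int.ofNat_eq_natCast] at h1 ⊢
    rw [h1, h2]
    omega
  | negSucc m =>
    have hneg : ¬ (0 : Int) ≤ Int.negSucc m := by omega
    have hma : (-(Int.negSucc m) - 1).toNat = m := by omega
    simp only [PySem.Int.band, if_neg hneg, if_pos (by norm_num : (0:Int) ≤ 255), hma]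
    have h255 : ((255 : Int)).toNat = 255 := rfl
    have h2 : (255 : Nat) &&& m = m % 256 := by
      rw [Nat.and_comm]
      have := Nat.and_two_pow_sub_one_eq_mod m 8
      norm_num at this; omega
    rw [h255, h2]
    have : Int.negSucc m = -(m : Int) - 1 := by omega
    omega

-- a single bit read (y >> k) & 1, k < 8, sees only y mod 256
theorem bit_eq_mod (y : Int) (k : Nat) (hk : k < 8) :
    PySem.Int.band (y >>> k) 1 = PySem.Int.band ((y % 256) >>> k) 1 := by
  rw [PySem.Int.band_one, PySem.Int.band_one,
      PySem.Int.mod_eq_emod_of_pos (by norm_num), PySem.Int.mod_eq_emod_of_pos (by norm_num),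
      Int.shiftRight_eq_div_pow, Int.shiftRight_eq_div_pow]
  interval_cases k <;> norm_num <;> omega

theorem bit0_eq_mod (y : Int) : PySem.Int.band y 1 = PySem.Int.band (y % 256) 1 := by
  simpa using bit_eq_mod y 0 (by norm_num)

theorem affineLoopA_mod (y : Int) : affineLoopA y = affineLoopA (y % 256) := by
  unfold affineLoopA
  norm_num [List.range_succ]
  simp only [bit_eq_mod y 1 (by norm_num), bit_eq_mod y 2 (by norm_num),
      bit_eq_mod y 3 (by norm_num), bit_eq_mod y 4 (by norm_num), bit_eq_mod y 5 (by norm_num),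
      bit_eq_mod y 6 (by norm_num), bit_eq_mod y 7 (by norm_num), bit0_eq_mod y]

theorem affineFormB_mod (y : Int) : affineFormB y = affineFormB (y % 256) := by
  unfold affineFormB
  simp only [band255_eq_emod, Int.emod_emod_of_dvd _ (by norm_num : (256:Int) ∣ 256)]

set_option maxRecDepth 100000 in
theorem affine_eq_on_byte : ∀ r : Nat, r < 256 → affineLoopA (r : Int) = affineFormB (r : Int) := by
  decide

theorem affine_eq (y : Int) : affineLoopA y = affineFormB y := by
  have h0 : 0 ≤ y % 256 := Int.emod_nonneg y (by norm_num)
  have h1 : y % 256 < 256 := Int.emod_lt_of_pos y (by norm_num)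
  have hr : ((y % 256).toNat : Int) = y % 256 := Int.toNat_of_nonneg h0
  rw [affineLoopA_mod, affineFormB_mod, ← hr]
  exact affine_eq_on_byte (y % 256).toNat (by omega)

-- ===== VERDICT (by name: the statement is the Claim_ definition above) =====
theorem affine_forward_py_spec : Claim_equal_affine_forward_py := by
  intro x _
  unfold Spec_affine_forward_py affine_forward_py affine_forward_py_alt
  rw [gfInv_eq, affine_eq]
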